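-- pv_equiv track=rewrite | github.com/queelius/computational-explorations | src/schur_groups.py | max_sum_free_size
-- ===== SOURCE A (Python) =====
-- from itertools import product, combinations
-- from typing import Set, List, Tuple, Dict, FrozenSet, Optional
--
-- def group_elements(orders: Tuple[int, ...]) -> List[Tuple[int, ...]]:
--     """All elements of ℤ/n₁ℤ × ℤ/n₂ℤ × ..."""
--     ranges = [range(n) for n in orders]
--     return list(product(*ranges))
--
-- def group_add(a: Tuple[int, ...], b: Tuple[int, ...],
--               orders: Tuple[int, ...]) -> Tuple[int, ...]:
--     """Componentwise addition mod orders."""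
--     return tuple((ai + bi) % ni for ai, bi, ni in zip(a, b, orders))
--
-- def is_sum_free(S: FrozenSet[Tuple[int, ...]], orders: Tuple[int, ...]) -> bool:
--     """Check if S is sum-free: no a,b,c ∈ S with a+b=c."""
--     S_set = set(S)
--     for a in S:
--         for b in S:
--             c = group_add(a, b, orders)
--             if c in S_set:
--                 return False
--     return True
--
-- def max_sum_free_size(orders: Tuple[int, ...]) -> int:
--     """Find maximum size of a sum-free subset of the group."""
--     elements = group_elements(orders)
--     n = len(elements)
--
--     # For small groups, exhaustive
--     if n <= 20:
--         best = 0
--         for size in range(n, 0, -1):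
--             if size <= best:
--                 break
--             for combo in combinations(range(n), size):
--                 S = frozenset(elements[i] for i in combo)
--                 if is_sum_free(S, orders):
--                     return size
--         return best
--
--     # For larger groups, try known constructions
--     return _heuristic_max_sum_free(elements, orders)
--
-- def _heuristic_max_sum_free(elements: list, orders: Tuple[int, ...]) -> int:
--     """Heuristic for max sum-free set size."""
--     # Try known sum-free constructions
--     best = 0
--
--     # Construction 1: "odd" elements in cyclic component
--     if len(orders) == 1:
--         n = orders[0]
--         # Upper third: {⌈n/3⌉, ..., ⌈2n/3⌉-1}
--         upper = frozenset((x,) for x in range(n // 3 + 1, (2 * n + 2) // 3))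
--         if is_sum_free(upper, orders):
--             best = max(best, len(upper))
--         # Odd residues
--         odds = frozenset((x,) for x in range(n) if x % 2 == 1)
--         if is_sum_free(odds, orders):
--             best = max(best, len(odds))
--
--     return best
-- ===== SOURCE B (Python) =====
-- def _group_elements(orders):
--     """All elements of the product group, first component slowest."""
--     if not all(n > 0 for n in orders):
--         return []  # some factor is empty, so the product is empty
--     elements = [()]
--     for n in reversed(orders):
--         elements = [(x,) + t for x in range(n) for t in elements]
--     return elements
--
-- def _add(a, b, orders):
--     return tuple((ai + bi) % ni for ai, bi, ni in zip(a, b, orders))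
--
-- def _sum_free(S, orders):
--     return all(_add(a, b, orders) not in S for a in S for b in S)
--
-- def _powerset(xs):
--     if not xs:
--         return [[]]
--     rest = _powerset(xs[1:])
--     return rest + [[xs[0]] + s for s in rest]
--
-- def max_sum_free_size(orders):
--     elements = _group_elements(orders)
--     n = len(elements)
--     if n <= 20:
--         # one flat scan over the whole powerset, tracking the max sum-free size
--         best = 0
--         for S in _powerset(elements):
--             if len(S) > best and _sum_free(S, orders):
--                 best = len(S)
--         return best
--     return _heuristic_max_sum_free(elements, orders)
--
-- def _heuristic_max_sum_free(elements, orders):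
--     best = 0
--     if len(orders) == 1:
--         n = orders[0]
--         upper = frozenset((x,) for x in range(n // 3 + 1, (2 * n + 2) // 3))
--         if _sum_free(upper, orders):
--             best = max(best, len(upper))
--         odds = frozenset((x,) for x in range(n) if x % 2 == 1)
--         if _sum_free(odds, orders):
--             best = max(best, len(odds))
--     return best
-- ===== Notes on version B (the rewrite author's own statement) =====
-- stated objective: alternative
-- what changed: The small-group exhaustive search no longer scans combinations size by size from n downward returning on the first sum-free hit; B makes one flat pass over the whole powerset (built recursively) and tracks the maximum size among sum-free subsets; B also detects an empty product group (some order <= 0) in one scan instead of materializing itertools.product's pools; the n<=20 threshold and the heuristic branch for larger groups are kept verbatim.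
import Mathlib
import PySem

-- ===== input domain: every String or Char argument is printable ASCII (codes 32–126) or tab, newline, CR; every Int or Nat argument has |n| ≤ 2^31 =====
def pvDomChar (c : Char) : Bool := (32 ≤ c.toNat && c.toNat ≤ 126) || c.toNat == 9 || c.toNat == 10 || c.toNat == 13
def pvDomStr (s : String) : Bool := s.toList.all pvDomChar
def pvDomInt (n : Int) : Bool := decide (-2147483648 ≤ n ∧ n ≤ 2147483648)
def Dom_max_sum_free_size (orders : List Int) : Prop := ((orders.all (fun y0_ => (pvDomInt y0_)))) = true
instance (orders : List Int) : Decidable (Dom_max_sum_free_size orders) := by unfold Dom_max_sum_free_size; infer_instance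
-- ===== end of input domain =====

-- B replaces A's decreasing-size scan over combinations (return on first sum-free hit) by one
-- flat pass over the whole powerset tracking the maximum sum-free size (objective: alternative).

-- ===== PORT A =====
-- shared helper: group_add — componentwise addition mod orders (zip truncates to the shortest list, as Python's zip does)
def groupAdd : List Int → List Int → List Int → List Int
  | a :: as, b :: bs, n :: ns => PySem.Int.mod (a + b) n :: groupAdd as bs ns
  | _, _, _ => []

-- shared helper: is_sum_free — no a, b ∈ S with a + b ∈ S.  Python iterates a frozenset, whose
-- (hash) order cannot affect this all-quantified Bool; membership in S_set = list membership here
-- since S is always duplicate-free.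
def isSumFree (S : List (List Int)) (orders : List Int) : Bool :=
  S.all fun a => S.all fun b => !(S.contains (groupAdd a b orders))

-- group_elements: itertools.product(range(n₁), range(n₂), …), first component slowest
def groupElementsA : List Int → List (List Int)
  | [] => [[]]
  | n :: rest => (PySem.List.pyRange 0 n 1).flatMap fun x => (groupElementsA rest).map (x :: ·)

-- _heuristic_max_sum_free (identical in Source A and Source B, kept verbatim).  len(frozenset) is ported
-- as list length: both ranges produce distinct values, so the frozensets have no collisions.
def heuristicMax (_elements : List (List Int)) (orders : List Int) : Int :=
  if orders.length == 1 then
    let n := PySem.List.pyGetD orders 0 0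
    let upper := (PySem.List.pyRange (PySem.Int.floordiv n 3 + 1) (PySem.Int.floordiv (2 * n + 2) 3) 1).map fun x => [x]
    let best1 : Int := if isSumFree upper orders then max 0 (upper.length : Int) else 0
    let odds := ((PySem.List.pyRange 0 n 1).filter fun x => PySem.Int.mod x 2 == 1).map fun x => [x]
    if isSumFree odds orders then max best1 (odds.length : Int) else best1
  else 0

-- 'for size in range(n, 0, -1): …' — best is never reassigned (the only exits are `return size`),
-- so `if size <= best: break` is dead code (size ≥ 1 > 0 = best) and the final `return best` returns 0.
def sizeLoopA (elements : List (List Int)) (orders : List Int) : Nat → Int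
  | 0 => 0
  | s + 1 =>
    if (PySem.List.combinations (List.range elements.length) (s + 1)).any
        (fun combo => isSumFree (combo.map fun i => elements.getD i []) orders) then
      ((s + 1 : Nat) : Int)
    else sizeLoopA elements orders s

def max_sum_free_size (orders : List Int) : Int :=
  let elements := groupElementsA orders
  if elements.length ≤ 20 then sizeLoopA elements orders elements.length
  else heuristicMax elements orders

-- ===== PORT B =====
-- _add: componentwise addition mod orders, via zip (truncates to the shortest list, as Python's zip does)
def addB (a b orders : List Int) : List Int :=
  ((a.zip b).zip orders).map fun p => PySem.Int.mod (p.1.1 + p.1.2) p.2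

-- _sum_free: one flat `all` over the pairs generator 'for a in S for b in S'
def sumFreeB (S : List (List Int)) (orders : List Int) : Bool :=
  (S.flatMap fun a => S.map fun b => addB a b orders).all fun c => !(S.contains c)

-- _heuristic_max_sum_free: identical in Source B as in Source A (kept verbatim); len(frozenset) is ported
-- as list length: both ranges produce distinct values, so the frozensets have no collisions.
def heuristicMaxB (_elements : List (List Int)) (orders : List Int) : Int :=
  if orders.length == 1 then
    let n := PySem.List.pyGetD orders 0 0
    let upper := (PySem.List.pyRange (PySem.Int.floordiv n 3 + 1) (PySem.Int.floordiv (2 * n + 2) 3) 1).map fun x => [x]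
    let best1 : Int := if sumFreeB upper orders then max 0 (upper.length : Int) else 0
    let odds := ((PySem.List.pyRange 0 n 1).filter fun x => PySem.Int.mod x 2 == 1).map fun x => [x]
    if sumFreeB odds orders then max best1 (odds.length : Int) else best1
  else 0

-- _powerset: recursive powerset, subsets without the head first
def powersetB : List (List Int) → List (List (List Int))
  | [] => [[]]
  | x :: xs => powersetB xs ++ (powersetB xs).map (x :: ·)

-- _group_elements: empty product short-circuit (itertools.product is lazy there), then a right fold
def groupElementsB (orders : List Int) : List (List Int) :=
  if orders.all (fun n => 0 < n) then
    orders.foldr (fun n acc => (PySem.List.pyRange 0 n 1).flatMap fun x => acc.map (x :: ·)) [[]]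
  else []

def max_sum_free_size_alt (orders : List Int) : Int :=
  let elements := groupElementsB orders
  if elements.length ≤ 20 then
    (((powersetB elements).foldl
        (fun (best : Nat) S => if best < S.length && sumFreeB S orders then S.length else best) 0 : Nat) : Int)
  else heuristicMaxB elements orders

-- ===== PRECONDITION & SPEC =====
def Spec_max_sum_free_size (orders : List Int) (out : Int) : Prop := out = max_sum_free_size_alt orders
instance (orders : List Int) (out : Int) : Decidable (Spec_max_sum_free_size orders out) := by unfold Spec_max_sum_free_size; infer_instance

-- ===== CLAIM (what is proved, stated in full; the proofs are below) =====
def Claim_equal_max_sum_free_size : Prop := ∀ (orders : List Int), Dom_max_sum_free_size orders → Spec_max_sum_free_size orders (max_sum_free_size orders)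

-- ===== LEMMAS AND PROOFS =====

-- B's zip-based componentwise addition equals A's recursive one
theorem addB_eq (a b orders : List Int) : addB a b orders = groupAdd a b orders := by
  induction a generalizing b orders with
  | nil => cases b <;> cases orders <;> rfl
  | cons x xs ih =>
    cases b with
    | nil => cases orders <;> rfl
    | cons y ys =>
      cases orders with
      | nil => rfl
      | cons n ns => simp only [addB, groupAdd, ← ih]; rfl

-- B's flat pass over the pair generator equals A's nested sum-free test
theorem sumFreeB_eq (S : List (List Int)) (orders : List Int) :
    sumFreeB S orders = isSumFree S orders := by
  simp only [sumFreeB, isSumFree, List.all_flatMap, List.all_map, addB_eq]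
  rfl

theorem heuristicMaxB_eq (e : List (List Int)) (orders : List Int) :
    heuristicMaxB e orders = heuristicMax e orders := by
  simp [heuristicMaxB, heuristicMax, sumFreeB_eq]

-- B builds the elements by a guarded right fold; it produces the same list as A's recursion.
theorem groupElements_eq (orders : List Int) :
    groupElementsB orders = groupElementsA orders := by
  unfold groupElementsB
  by_cases hp : orders.all (fun n => 0 < n) = true
  · rw [if_pos hp]
    induction orders with
    | nil => rfl
    | cons n rest ih =>
      simp only [List.all_cons, Bool.and_eq_true] at hp
      simp [groupElementsA, ← ih hp.2]
  · rw [if_neg hp]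
    induction orders with
    | nil => exact absurd rfl hp
    | cons n rest ih =>
      simp only [List.all_cons, Bool.and_eq_true, not_and_or] at hp
      rcases hp with hn | hr
      · rw [groupElementsA, PySem.List.pyRange_one_eq_nil (by simpa using hn)]
        rfl
      · rw [groupElementsA, ← ih (by simpa using hr)]
        simp

-- the lengths of the sum-free subsets of `e`, in B's enumeration order
def lensOf (e : List (List Int)) (orders : List Int) : List Nat :=
  ((powersetB e).filter (fun S => isSumFree S orders)).map List.length

theorem powersetB_eq_sublists' (l : List (List Int)) : powersetB l = l.sublists' := by
  induction l with
  | nil => rfl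
  | cons x xs ih => simp [powersetB, List.sublists'_cons, ih]

theorem mem_lensOf (e : List (List Int)) (orders : List Int) (k : Nat) :
    k ∈ lensOf e orders ↔ ∃ S, S.Sublist e ∧ S.length = k ∧ isSumFree S orders = true := by
  simp only [lensOf, List.mem_map, List.mem_filter, powersetB_eq_sublists', List.mem_sublists']
  constructor
  · rintro ⟨S, ⟨hs, hg⟩, hl⟩; exact ⟨S, hs, hl, hg⟩
  · rintro ⟨S, hs, hl, hg⟩; exact ⟨S, ⟨hs, hg⟩, hl⟩

theorem map_getD_range (e : List (List Int)) :
    (List.range e.length).map (fun i => e.getD i []) = e := by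
  apply List.ext_getElem
  · simp
  · intro i h1 h2
    simp only [List.getElem_map, List.getElem_range]
    exact List.getD_eq_getElem e [] h2

-- A's inner combinations pass finds a sum-free subset of size k iff k is an achievable sum-free size
theorem anyCombos_iff (e : List (List Int)) (orders : List Int) (k : Nat) :
    ((PySem.List.combinations (List.range e.length) k).any
      (fun combo => isSumFree (combo.map fun i => e.getD i []) orders)) = true
    ↔ k ∈ lensOf e orders := by
  have h1 : (PySem.List.combinations (List.range e.length) k).any
      (fun combo => isSumFree (combo.map fun i => e.getD i []) orders)
      = (PySem.List.combinations ((List.range e.length).map fun i => e.getD i []) k).any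
          (fun S => isSumFree S orders) := by
    rw [PySem.List.combinations_map, List.any_map]; rfl
  rw [h1, map_getD_range, List.any_eq_true, mem_lensOf]
  constructor
  · rintro ⟨S, hm, hg⟩
    obtain ⟨hs, hl⟩ := (PySem.List.mem_combinations_iff e k S).mp hm
    exact ⟨S, hs, hl, hg⟩
  · rintro ⟨S, hs, hl, hg⟩
    exact ⟨S, (PySem.List.mem_combinations_iff e k S).mpr ⟨hs, hl⟩, hg⟩

theorem lensOf_le (e : List (List Int)) (orders : List Int) :
    ∀ m ∈ lensOf e orders, m ≤ e.length := by
  intro m hm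
  obtain ⟨S, hs, hl, _⟩ := (mem_lensOf e orders m).mp hm
  exact hl ▸ hs.length_le

-- B's running-max loop equals a fold of max over the sum-free lengths
theorem foldB_eq (orders : List Int) (l : List (List (List Int))) (b : Nat) :
    l.foldl (fun (best : Nat) S => if best < S.length && isSumFree S orders then S.length else best) b
      = ((l.filter (fun S => isSumFree S orders)).map List.length).foldl max b := by
  induction l generalizing b with
  | nil => rfl
  | cons x xs ih =>
    simp only [List.foldl_cons]
    rw [ih]
    rw [List.filter_cons]
    by_cases h : isSumFree x orders = true
    · simp only [h, if_true, List.map_cons, List.foldl_cons, Bool.and_true]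
      congr 1
      rcases Nat.lt_or_ge b x.length with hl | hl
      · simp [hl, Nat.max_eq_right (Nat.le_of_lt hl)]
      · simp [Nat.not_lt.mpr hl, Nat.max_eq_left hl]
    · simp only [h, Bool.and_false, if_neg (Bool.false_ne_true)]

-- the truncated maximum A's size loop computes
def truncMax (e : List (List Int)) (orders : List Int) (s : Nat) : Nat :=
  ((lensOf e orders).filter (fun m => m ≤ s)).foldl max 0

theorem foldl_max_le {t : List Nat} {a k : Nat} (ha : a ≤ k) (h : ∀ y ∈ t, y ≤ k) :
    t.foldl max a ≤ k := by
  rcases PySem.List.foldl_max_mem t a with hc | hc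
  · omega
  · exact h _ hc

theorem truncMax_succ_mem (e : List (List Int)) (orders : List Int) (s : Nat)
    (h : s + 1 ∈ lensOf e orders) : truncMax e orders (s + 1) = s + 1 := by
  apply Nat.le_antisymm
  · apply foldl_max_le (Nat.zero_le _)
    intro y hy
    simpa using (List.mem_filter.mp hy).2
  · exact (PySem.List.le_foldl_max _ 0).2 (s + 1)
      (List.mem_filter.mpr ⟨h, by simp⟩)

theorem truncMax_succ_not (e : List (List Int)) (orders : List Int) (s : Nat)
    (h : s + 1 ∉ lensOf e orders) : truncMax e orders (s + 1) = truncMax e orders s := by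
  unfold truncMax
  congr 1
  apply List.filter_congr
  intro m hm
  have : m ≠ s + 1 := fun he => h (he ▸ hm)
  simp only [decide_eq_decide]
  omega

theorem sizeLoopA_eq (e : List (List Int)) (orders : List Int) (s : Nat) :
    sizeLoopA e orders s = ((truncMax e orders s : Nat) : Int) := by
  induction s with
  | zero =>
    have : truncMax e orders 0 = 0 := by
      apply Nat.le_antisymm _ (Nat.zero_le _)
      apply foldl_max_le (Nat.le_refl 0)
      intro y hy
      simpa using (List.mem_filter.mp hy).2
    simp [sizeLoopA, this]
  | succ s ih =>
    rw [sizeLoopA]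
    by_cases h : ((PySem.List.combinations (List.range e.length) (s + 1)).any
        (fun combo => isSumFree (combo.map fun i => e.getD i []) orders)) = true
    · rw [if_pos h, truncMax_succ_mem e orders s ((anyCombos_iff e orders (s + 1)).mp h)]
    · rw [if_neg h, ih,
        truncMax_succ_not e orders s (fun hm => h ((anyCombos_iff e orders (s + 1)).mpr hm))]

theorem truncMax_top (e : List (List Int)) (orders : List Int) :
    truncMax e orders e.length = (lensOf e orders).foldl max 0 := by
  unfold truncMax
  congr 1
  rw [List.filter_eq_self]
  intro m hm
  simpa using lensOf_le e orders m hm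

-- ===== VERDICT (by name: the statement is the Claim_ definition above) =====
theorem max_sum_free_size_spec : Claim_equal_max_sum_free_size := by
  intro orders _
  show max_sum_free_size orders = max_sum_free_size_alt orders
  unfold max_sum_free_size max_sum_free_size_alt
  rw [groupElements_eq]
  set e := groupElementsA orders with he
  simp only [sumFreeB_eq, heuristicMaxB_eq]
  by_cases h : e.length ≤ 20
  · rw [if_pos h, if_pos h, sizeLoopA_eq, truncMax_top, foldB_eq]
    rfl
  · rw [if_neg h, if_neg h]
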